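-- pv_equiv track=rewrite | github.com/NIHRIO/IronyDetectionInTwitter | src/DataProcessor.py | normalise_str
-- ===== SOURCE A (Python) =====
-- def normalise_str(str_in):
--     normalised_str = ""
--     count = 0
--     pre_char = None
--     for i in range(len(str_in)):
--         if i > 0:
--             if str_in[i] == pre_char:
--                 count += 1
--             else:
--                 count = 0
--         if count <= 2:
--             normalised_str += str_in[i]
--         pre_char = str_in[i]
--     return normalised_str
-- ===== SOURCE B (Python) =====
-- def normalise_str(str_in):
--     out = []
--     i = 0
--     n = len(str_in)
--     while i < n:
--         c = str_in[i]
--         j = i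
--         while j < n and str_in[j] == c:
--             j += 1
--         out.append(c * min(j - i, 3))
--         i = j
--     return ''.join(out)
-- ===== Notes on version B (the rewrite author's own statement) =====
-- stated objective: alternative
-- what changed: B scans the string run by run (finding each maximal run of equal characters and emitting char*min(run,3) into a joined list) instead of A's per-character loop with a previous-character/counter state and string concatenation.
import Mathlib
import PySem

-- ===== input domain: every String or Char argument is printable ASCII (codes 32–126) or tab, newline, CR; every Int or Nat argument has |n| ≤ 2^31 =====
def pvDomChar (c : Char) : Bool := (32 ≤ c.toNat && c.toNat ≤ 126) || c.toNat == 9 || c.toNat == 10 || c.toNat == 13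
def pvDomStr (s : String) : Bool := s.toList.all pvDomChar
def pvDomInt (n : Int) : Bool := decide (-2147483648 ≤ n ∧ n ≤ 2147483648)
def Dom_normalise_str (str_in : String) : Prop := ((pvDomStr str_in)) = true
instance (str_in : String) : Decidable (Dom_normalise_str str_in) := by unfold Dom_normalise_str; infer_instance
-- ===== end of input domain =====

-- B replaces A's per-character previous-char/counter loop by a run-by-run scan emitting min(run,3) copies of each run's character (alternative decomposition).

-- ===== PORT A =====
-- A's for-loop over range(len(str_in)) with state (count, pre_char, normalised_str)
def normAGo : List Char → Nat → Int → Option Char → List Char → List Char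
  | [], _, _, _, acc => acc
  | c :: rest, i, count, pre, acc =>
    let count' : Int := if i > 0 then (if some c = pre then count + 1 else 0) else count
    let acc' := if count' ≤ 2 then acc ++ [c] else acc
    normAGo rest (i + 1) count' (some c) acc'

def normalise_str (str_in : String) : String :=
  String.ofList (normAGo str_in.toList 0 0 none [])

-- ===== PORT B =====
-- B's outer while-loop: each iteration consumes one maximal run (inner while = takeWhile/dropWhile)
def normBGo (l : List Char) : List Char :=
  match l with
  | [] => []
  | c :: rest =>
    let run := 1 + (rest.takeWhile (fun x => x = c)).length
    List.replicate (min run 3) c ++ normBGo (rest.dropWhile (fun x => x = c))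
termination_by l.length
decreasing_by
  simp only [List.length_cons]
  exact Nat.lt_succ_of_le (List.length_dropWhile_le _ _)

def normalise_str_alt (str_in : String) : String :=
  String.ofList (normBGo str_in.toList)

-- ===== PRECONDITION & SPEC =====
def Spec_normalise_str (str_in : String) (out : String) : Prop := out = normalise_str_alt str_in
instance (str_in : String) (out : String) : Decidable (Spec_normalise_str str_in out) := by unfold Spec_normalise_str; infer_instance

-- ===== CLAIM (what is proved, stated in full; the proofs are below) =====
def Claim_equal_normalise_str : Prop := ∀ (str_in : String), Dom_normalise_str str_in → Spec_normalise_str str_in (normalise_str str_in)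

-- ===== LEMMAS AND PROOFS =====

-- Consuming a whole run of c with pre = some c, starting count k ≥ 0, emits min m (2-k).toNat copies.
theorem normAGo_run (m : Nat) (c : Char) : ∀ (rest acc : List Char) (i : Nat) (k : Int),
    1 ≤ i → 0 ≤ k →
    normAGo (List.replicate m c ++ rest) i k (some c) acc =
      normAGo rest (i + m) (k + m) (some c) (acc ++ List.replicate (min m (2 - k).toNat) c) := by
  induction m with
  | zero => intro rest acc i k hi hk; simp
  | succ m ih =>
    intro rest acc i k hi hk
    have hstep : normAGo (List.replicate (m + 1) c ++ rest) i k (some c) acc =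
        normAGo (List.replicate m c ++ rest) (i + 1) (k + 1) (some c)
          (if k + 1 ≤ 2 then acc ++ [c] else acc) := by
      simp only [List.replicate_succ, List.cons_append, normAGo]
      have hi' : i > 0 := hi
      simp [hi']
    rw [hstep, ih rest _ (i + 1) (k + 1) (by omega) (by omega)]
    have harith1 : i + 1 + m = i + (m + 1) := by omega
    have harith2 : k + 1 + (m : Int) = k + ((m + 1 : Nat) : Int) := by push_cast; ring
    rw [harith1, harith2]
    congr 1
    by_cases h2 : k + 1 ≤ 2
    · have ht : (2 - (k + 1)).toNat = (2 - k).toNat - 1 := by omega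
      have hmin : min (m + 1) (2 - k).toNat = min m ((2 - k).toNat - 1) + 1 := by omega
      rw [if_pos h2, ht, hmin, List.replicate_succ]
      simp
    · have e1 : (2 - k).toNat = 0 := by omega
      have e2 : (2 - (k + 1)).toNat = 0 := by omega
      rw [if_neg h2, e1, e2]
      simp

theorem normAGo_main (n : Nat) : ∀ (l : List Char), l.length ≤ n →
    ∀ (acc : List Char) (i : Nat) (k : Int),
    ∀ (pre : Option Char), l.head? ≠ pre → (i = 0 → k = 0) →
    normAGo l i k pre acc = acc ++ normBGo l := by
  induction n with
  | zero =>
    intro l hl acc i k pre hpre hi0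
    have : l = [] := List.length_eq_zero_iff.mp (Nat.le_zero.mp hl)
    subst this; simp [normAGo, normBGo]
  | succ n ih =>
    intro l hl acc i k pre hpre hi0
    match l with
    | [] => simp [normAGo, normBGo]
    | c :: rest =>
      have hcount : (if i > 0 then (if some c = pre then k + 1 else (0:Int)) else k) = 0 := by
        by_cases hi : i > 0
        · have : some c ≠ pre := by simpa using hpre
          simp [hi, this]
        · have : i = 0 := by omega
          simp [hi, hi0 this]
      have hstep : normAGo (c :: rest) i k pre acc =
          normAGo rest (i + 1) 0 (some c) (acc ++ [c]) := by
        simp only [normAGo, hcount]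
        norm_num
      set m := (rest.takeWhile (fun x => x = c)).length with hm
      set rest' := rest.dropWhile (fun x => x = c) with hrest'
      have htake : rest.takeWhile (fun x => x = c) = List.replicate m c := by
        apply List.eq_replicate_of_mem
        intro b hb
        simpa using List.mem_takeWhile_imp hb
      have hdecomp : rest = List.replicate m c ++ rest' := by
        rw [← htake, hrest', List.takeWhile_append_dropWhile]
      have hhead' : rest'.head? ≠ some c := by
        intro h
        have h2 := List.head?_dropWhile_not (fun x => x = c) rest
        rw [← hrest', h] at h2
        simp at h2
      have hlen : rest'.length ≤ n := by
        have h1 : rest'.length ≤ rest.length := List.length_dropWhile_le _ _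
        simp only [List.length_cons] at hl
        omega
      have hB : normBGo (c :: rest) = List.replicate (min (1 + m) 3) c ++ normBGo rest' := by
        rw [normBGo]
      have hrep : [c] ++ List.replicate (min m ((2:Int) - 0).toNat) c =
          List.replicate (min (1 + m) 3) c := by
        have h1 : ((2:Int) - 0).toNat = 2 := rfl
        have h2 : min (1 + m) 3 = min m 2 + 1 := by omega
        rw [h1, h2, List.replicate_succ]
        rfl
      calc normAGo (c :: rest) i k pre acc
          = normAGo (List.replicate m c ++ rest') (i + 1) 0 (some c) (acc ++ [c]) := by
            rw [hstep, ← hdecomp]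
        _ = normAGo rest' (i + 1 + m) (0 + (m : Int)) (some c)
              (acc ++ [c] ++ List.replicate (min m ((2:Int) - 0).toNat) c) :=
            normAGo_run m c rest' (acc ++ [c]) (i + 1) 0 (by omega) le_rfl
        _ = acc ++ [c] ++ List.replicate (min m ((2:Int) - 0).toNat) c ++ normBGo rest' :=
            ih rest' hlen _ (i + 1 + m) (0 + (m : Int)) (some c) hhead' (by omega)
        _ = acc ++ normBGo (c :: rest) := by
            rw [hB, ← hrep]
            simp [List.append_assoc]

-- ===== VERDICT (by name: the statement is the Claim_ definition above) =====
theorem normalise_str_spec : Claim_equal_normalise_str := by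
  intro s _
  unfold Spec_normalise_str normalise_str normalise_str_alt
  congr 1
  match h : s.toList with
  | [] => simp [normAGo, normBGo]
  | c :: rest =>
    have := normAGo_main (c :: rest).length (c :: rest) le_rfl [] 0 0 none (by simp) (fun _ => rfl)
    simpa using this
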